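-- pv_equiv track=rewrite | github.com/DefElement/defelement.com | builder/markup.py | python_highlight
-- ===== SOURCE A (Python) =====
-- def python_highlight(txt):
--     txt = txt.replace(" ", "&nbsp;")
--     out = []
--     for line in txt.split("\n"):
--         comment = ""
--         if "#" in line:
--             lsp = line.split("#", 1)
--             line = lsp[0]
--             comment = f"<span style='color:#FF8800'>#{lsp[1]}</span>"
--
--         lsp = line.split("\"")
--         line = lsp[0]
--
--         for i, j in enumerate(lsp[1:]):
--             if i % 2 == 0:
--                 line += f"<span style='color:#DD2299'>\"{j}"
--             else:
--                 line += f"\"</span>{j}"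
--
--         out.append(line + comment)
--     return "<br />".join(out)
-- ===== SOURCE B (Python) =====
-- def _color_strings(code):
--     """Single left-to-right scan holding an in_string flag (no split/alternate)."""
--     pieces = []
--     in_string = False
--     for ch in code:
--         if ch != '"':
--             pieces.append(ch)
--         elif in_string:
--             pieces.append('"</span>')
--             in_string = False
--         else:
--             pieces.append("<span style='color:#DD2299'>\"")
--             in_string = True
--     return "".join(pieces)
--
--
-- def python_highlight(txt):
--     out = []
--     for line in txt.replace(" ", "&nbsp;").split("\n"):
--         comment = ""
--         if "#" in line:
--             line, rest = line.split("#", 1)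
--             comment = f"<span style='color:#FF8800'>#{rest}</span>"
--         out.append(_color_strings(line) + comment)
--     return "<br />".join(out)
-- ===== Notes on version B (the rewrite author's own statement) =====
-- stated objective: alternative
-- what changed: The per-line string highlighting no longer splits the line at quote characters and alternates span markers over the enumerated segments by index parity; instead a single character-by-character scan carries an in_string flag and emits the opening or closing span piece at each quote it meets.
import Mathlib
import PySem

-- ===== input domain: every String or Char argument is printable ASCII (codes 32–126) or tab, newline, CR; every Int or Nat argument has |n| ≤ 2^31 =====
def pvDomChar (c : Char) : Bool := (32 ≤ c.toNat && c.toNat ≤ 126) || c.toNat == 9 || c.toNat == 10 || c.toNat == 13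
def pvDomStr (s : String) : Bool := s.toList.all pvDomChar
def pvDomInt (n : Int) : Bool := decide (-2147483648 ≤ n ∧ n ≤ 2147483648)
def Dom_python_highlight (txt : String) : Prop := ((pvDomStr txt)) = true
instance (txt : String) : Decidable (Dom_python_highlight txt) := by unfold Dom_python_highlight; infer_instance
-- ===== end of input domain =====

-- B replaces A's split-on-'"' + enumerate/parity alternation by a single character scan
-- holding an in_string flag (objective: alternative decomposition, same cost).

-- shared string literals (the HTML snippets both Pythons write)
def hlOpen : List Char := "<span style='color:#DD2299'>".toList
def hlClose : List Char := "</span>".toList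
def hlComment : List Char := "<span style='color:#FF8800'>".toList

-- ===== PORT A =====
-- per line: split off the comment at the first '#', then split on '"' and
-- alternate <span>-markers over the enumerated tail segments (A's inner loop)
def hlLineA (line : List Char) : List Char :=
  let lc : List Char × List Char :=
    if PySem.Chars.isIn ['#'] line then
      let lsp := PySem.Chars.splitOnMax line ['#'] 1
      ((PySem.List.pyGet? lsp 0).getD [],
       hlComment ++ '#' :: (PySem.List.pyGet? lsp 1).getD [] ++ hlClose)
    else (line, [])
  let lsp := PySem.Chars.splitOn lc.1 ['"']
  let line0 := (PySem.List.pyGet? lsp 0).getD []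
  let line1 := (PySem.List.enumerate (PySem.List.slice lsp (some 1) none) 0).foldl
    (fun acc ij =>
      if PySem.Int.mod ij.1 2 == 0 then acc ++ hlOpen ++ '"' :: ij.2
      else acc ++ '"' :: hlClose ++ ij.2) line0
  line1 ++ lc.2

def python_highlight (txt : String) : String :=
  let t := PySem.Chars.replace txt.toList [' '] "&nbsp;".toList
  String.ofList (PySem.Chars.join "<br />".toList
    ((PySem.Chars.splitOn t ['\n']).map hlLineA))

-- ===== PORT B =====
-- B's inner loop: one scan over the code with an in_string flag
def colorStrings (inString : Bool) : List Char → List Char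
  | [] => []
  | c :: cs =>
    if c ≠ '"' then c :: colorStrings inString cs
    else if inString then '"' :: hlClose ++ colorStrings false cs
    else hlOpen ++ '"' :: colorStrings true cs

def hlLineB (line : List Char) : List Char :=
  let lc : List Char × List Char :=
    if PySem.Chars.isIn ['#'] line then
      let lsp := PySem.Chars.splitOnMax line ['#'] 1
      ((PySem.List.pyGet? lsp 0).getD [],
       hlComment ++ '#' :: (PySem.List.pyGet? lsp 1).getD [] ++ hlClose)
    else (line, [])
  colorStrings false lc.1 ++ lc.2

def python_highlight_alt (txt : String) : String :=
  let t := PySem.Chars.replace txt.toList [' '] "&nbsp;".toList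
  String.ofList (PySem.Chars.join "<br />".toList
    ((PySem.Chars.splitOn t ['\n']).map hlLineB))

-- ===== PRECONDITION & SPEC =====
def Spec_python_highlight (txt : String) (out : String) : Prop := out = python_highlight_alt txt
instance (txt : String) (out : String) : Decidable (Spec_python_highlight txt out) := by unfold Spec_python_highlight; infer_instance

-- ===== CLAIM (what is proved, stated in full; the proofs are below) =====
def Claim_equal_python_highlight : Prop := ∀ (txt : String), Dom_python_highlight txt → Spec_python_highlight txt (python_highlight txt)

-- ===== LEMMAS AND PROOFS =====

-- clean recursion computing (first segment, remaining segments) of a split at q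
def splitQ (q : Char) : List Char → List Char × List (List Char)
  | [] => ([], [])
  | c :: cs =>
    let sr := splitQ q cs
    if c = q then ([], sr.1 :: sr.2) else (c :: sr.1, sr.2)

-- the alternating markers over the tail segments, as one recursion
def chainQ (inString : Bool) : List (List Char) → List Char
  | [] => []
  | s :: r =>
    (if inString then '"' :: hlClose else hlOpen ++ ['"']) ++ s ++ chainQ (!inString) r

theorem splitOn_go_eq (q : Char) :
    ∀ (l : List Char) (fuel : Nat), l.length < fuel → ∀ (cur : List Char) (acc : List (List Char)),
    PySem.Chars.splitOn.go [q] fuel l cur acc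
      = acc.reverse ++ (cur.reverse ++ (splitQ q l).1) :: (splitQ q l).2 := by
  intro l
  induction l with
  | nil =>
    intro fuel hf cur acc
    match fuel, hf with
    | fuel + 1, _ => simp [PySem.Chars.splitOn.go, splitQ]
  | cons c rest ih =>
    intro fuel hf cur acc
    match fuel, hf with
    | fuel + 1, hf =>
      have hrest : rest.length < fuel := by simpa using Nat.lt_of_succ_lt_succ hf
      by_cases hc : q = c
      · subst hc
        rw [show PySem.Chars.splitOn.go [q] (fuel + 1) (q :: rest) cur acc
              = PySem.Chars.splitOn.go [q] fuel rest [] (cur.reverse :: acc) by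
            simp [PySem.Chars.splitOn.go, List.isPrefixOf]]
        rw [ih fuel hrest [] (cur.reverse :: acc)]
        simp [splitQ]
      · rw [show PySem.Chars.splitOn.go [q] (fuel + 1) (c :: rest) cur acc
              = PySem.Chars.splitOn.go [q] fuel rest (c :: cur) acc by
            simp [PySem.Chars.splitOn.go, List.isPrefixOf, hc]]
        rw [ih fuel hrest (c :: cur) acc]
        simp [splitQ, Ne.symm hc]

theorem splitOn_single (q : Char) (l : List Char) :
    PySem.Chars.splitOn l [q] = (splitQ q l).1 :: (splitQ q l).2 := by
  have := splitOn_go_eq q l (l.length + 1) (Nat.lt_succ_self _) [] []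
  simpa [PySem.Chars.splitOn] using this

-- B's scan equals first-segment ++ alternating chain
theorem colorStrings_eq_chain (l : List Char) :
    ∀ b, colorStrings b l = (splitQ '"' l).1 ++ chainQ b (splitQ '"' l).2 := by
  induction l with
  | nil => intro b; simp [colorStrings, splitQ, chainQ]
  | cons c cs ih =>
    intro b
    by_cases hc : c = '"'
    · subst hc
      cases b <;> simp [colorStrings, splitQ, chainQ, ih]
    · simp [colorStrings, splitQ, hc, ih b]

-- A's enumerate/parity fold equals the same chain
theorem foldA_eq_chain (r : List (List Char)) :
    ∀ (s : Int), 0 ≤ s → ∀ (line : List Char),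
    (PySem.List.enumerate r s).foldl
      (fun acc ij =>
        if PySem.Int.mod ij.1 2 == 0 then acc ++ hlOpen ++ '"' :: ij.2
        else acc ++ '"' :: hlClose ++ ij.2) line
      = line ++ chainQ (!(PySem.Int.mod s 2 == 0)) r := by
  induction r with
  | nil => intro s _ line; simp [PySem.List.enumerate_nil, chainQ]
  | cons j r ih =>
    intro s hs line
    rw [PySem.List.enumerate_cons]
    simp only [List.foldl_cons]
    rw [ih (s + 1) (by omega)]
    by_cases h : s % 2 = 0
    · have h1 : (s + 1) % 2 = 1 := by omega
      simp [chainQ, h, h1]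
    · have h0 : s % 2 = 1 := by omega
      have h1 : (s + 1) % 2 = 0 := by omega
      simp [chainQ, h0, h1]

theorem quotesA_eq (cs : List Char) :
    (PySem.List.enumerate
        (PySem.List.slice (PySem.Chars.splitOn cs ['"']) (some 1) none) 0).foldl
      (fun acc ij =>
        if PySem.Int.mod ij.1 2 == 0 then acc ++ hlOpen ++ '"' :: ij.2
        else acc ++ '"' :: hlClose ++ ij.2)
      ((PySem.List.pyGet? (PySem.Chars.splitOn cs ['"']) 0).getD [])
      = colorStrings false cs := by
  rw [splitOn_single '"' cs]
  rw [PySem.List.slice_from _ (by norm_num : (0:Int) ≤ 1)]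
  simp only [PySem.List.pyGet?, PySem.List.pyIdx?]
  rw [foldA_eq_chain _ 0 le_rfl]
  rw [colorStrings_eq_chain]
  simp [PySem.Int.mod, Int.fmod]

theorem hlLine_eq (line : List Char) : hlLineA line = hlLineB line := by
  unfold hlLineA hlLineB
  simp only []
  exact congrArg (· ++ _) (quotesA_eq _)

-- ===== VERDICT (by name: the statement is the Claim_ definition above) =====
theorem python_highlight_spec : Claim_equal_python_highlight := by
  intro txt _
  unfold Spec_python_highlight python_highlight python_highlight_alt
  simp [List.map_congr_left (fun l _ => hlLine_eq l)]
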